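-- pv_equiv track=rewrite | github.com/HenriHyttinen/Ai-assistant | backend/scripts/_legacy/select_best_recipes.py | determine_cuisine_from_categories
-- ===== SOURCE A (Python) =====
-- def determine_cuisine_from_categories(categories):
--     """Determine cuisine from actual categories"""
--     if not categories:
--         return "International"
--
--     category_list = [cat.strip().lower() for cat in categories.split('\n') if cat.strip()]
--
--     # Cuisine detection based on actual categories
--     if any(cat in category_list for cat in ['italian', 'pasta', 'pizza', 'risotto', 'bruschetta', 'carbonara', 'lasagna', 'gnocchi', 'fettuccine', 'parmesan', 'mozzarella', 'bon appétit']):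
--         return "Italian"
--     elif any(cat in category_list for cat in ['mexican', 'taco', 'burrito', 'enchilada', 'quesadilla', 'jalapeño', 'salsa', 'guacamole', 'chile', 'tortilla']):
--         return "Mexican"
--     elif any(cat in category_list for cat in ['chinese', 'kung pao', 'lo mein', 'stir-fry', 'wok', 'soy sauce', 'ginger', 'sesame', 'bok choy']):
--         return "Chinese"
--     elif any(cat in category_list for cat in ['thai', 'pad thai', 'curry', 'tom yum', 'coconut', 'lemongrass', 'basil']):
--         return "Thai"
--     elif any(cat in category_list for cat in ['japanese', 'sushi', 'ramen', 'tempura', 'miso', 'teriyaki', 'wasabi', 'nori']):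
--         return "Japanese"
--     elif any(cat in category_list for cat in ['korean', 'kimchi', 'bulgogi', 'bibimbap', 'gochujang']):
--         return "Korean"
--     elif any(cat in category_list for cat in ['indian', 'curry', 'tikka', 'biryani', 'naan', 'masala', 'dal', 'chutney']):
--         return "Indian"
--     elif any(cat in category_list for cat in ['french', 'coq au vin', 'ratatouille', 'crêpe', 'bourguignon', 'confit', 'terrine']):
--         return "French"
--     elif any(cat in category_list for cat in ['german', 'schnitzel', 'bratwurst', 'sauerkraut', 'spätzle']):
--         return "German"
--     elif any(cat in category_list for cat in ['spanish', 'paella', 'tapas', 'gazpacho', 'chorizo', 'sherry']):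
--         return "Spanish"
--     elif any(cat in category_list for cat in ['greek', 'moussaka', 'souvlaki', 'tzatziki', 'feta', 'olive']):
--         return "Greek"
--     elif any(cat in category_list for cat in ['middle eastern', 'hummus', 'falafel', 'kebab', 'pita', 'tahini']):
--         return "Middle Eastern"
--     elif any(cat in category_list for cat in ['american', 'burger', 'bbq', 'mac and cheese', 'bacon', 'cheesecake', 'fourth of july', 'picnic']):
--         return "American"
--     elif any(cat in category_list for cat in ['mediterranean', 'olive', 'feta', 'tomato', 'basil']):
--         return "Mediterranean"
--     elif any(cat in category_list for cat in ['asian', 'stir', 'noodle', 'soy', 'ginger']):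
--         return "Asian"
--
--     return "International"
-- ===== SOURCE B (Python) =====
-- CUISINES = [
--     ("Italian", ('italian', 'pasta', 'pizza', 'risotto', 'bruschetta', 'carbonara', 'lasagna', 'gnocchi', 'fettuccine', 'parmesan', 'mozzarella', 'bon appétit')),
--     ("Mexican", ('mexican', 'taco', 'burrito', 'enchilada', 'quesadilla', 'jalapeño', 'salsa', 'guacamole', 'chile', 'tortilla')),
--     ("Chinese", ('chinese', 'kung pao', 'lo mein', 'stir-fry', 'wok', 'soy sauce', 'ginger', 'sesame', 'bok choy')),
--     ("Thai", ('thai', 'pad thai', 'curry', 'tom yum', 'coconut', 'lemongrass', 'basil')),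
--     ("Japanese", ('japanese', 'sushi', 'ramen', 'tempura', 'miso', 'teriyaki', 'wasabi', 'nori')),
--     ("Korean", ('korean', 'kimchi', 'bulgogi', 'bibimbap', 'gochujang')),
--     ("Indian", ('indian', 'curry', 'tikka', 'biryani', 'naan', 'masala', 'dal', 'chutney')),
--     ("French", ('french', 'coq au vin', 'ratatouille', 'crêpe', 'bourguignon', 'confit', 'terrine')),
--     ("German", ('german', 'schnitzel', 'bratwurst', 'sauerkraut', 'spätzle')),
--     ("Spanish", ('spanish', 'paella', 'tapas', 'gazpacho', 'chorizo', 'sherry')),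
--     ("Greek", ('greek', 'moussaka', 'souvlaki', 'tzatziki', 'feta', 'olive')),
--     ("Middle Eastern", ('middle eastern', 'hummus', 'falafel', 'kebab', 'pita', 'tahini')),
--     ("American", ('american', 'burger', 'bbq', 'mac and cheese', 'bacon', 'cheesecake', 'fourth of july', 'picnic')),
--     ("Mediterranean", ('mediterranean', 'olive', 'feta', 'tomato', 'basil')),
--     ("Asian", ('asian', 'stir', 'noodle', 'soy', 'ginger')),
-- ]
--
-- # Inverted index built once: keyword -> priority of the highest-priority cuisine using it
-- # (setdefault keeps the FIRST cuisine, so overlapping keywords like 'curry' or 'olive'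
-- # resolve to the earlier cuisine exactly as the original chain's priority does).
-- PRIORITY = {}
-- for _i, (_name, _kws) in enumerate(CUISINES):
--     for _kw in _kws:
--         PRIORITY.setdefault(_kw, _i)
-- NAMES = [name for name, _ in CUISINES]
--
--
-- def determine_cuisine_from_categories(categories):
--     """Determine cuisine from actual categories"""
--     if not categories:
--         return "International"
--     best = None
--     for raw in categories.split('\n'):
--         i = PRIORITY.get(raw.strip().lower())
--         if i is not None and (best is None or i < best):
--             best = i
--     return NAMES[best] if best is not None else "International"
-- ===== Notes on version B (the rewrite author's own statement) =====
-- stated objective: alternative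
-- what changed: Replaced the 15-branch if/elif chain that scans every keyword group against the category list by an inverted keyword->priority dict built once with setdefault, plus a single pass over the input lines keeping the minimum matched priority and indexing a names table at the end.
import Mathlib
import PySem

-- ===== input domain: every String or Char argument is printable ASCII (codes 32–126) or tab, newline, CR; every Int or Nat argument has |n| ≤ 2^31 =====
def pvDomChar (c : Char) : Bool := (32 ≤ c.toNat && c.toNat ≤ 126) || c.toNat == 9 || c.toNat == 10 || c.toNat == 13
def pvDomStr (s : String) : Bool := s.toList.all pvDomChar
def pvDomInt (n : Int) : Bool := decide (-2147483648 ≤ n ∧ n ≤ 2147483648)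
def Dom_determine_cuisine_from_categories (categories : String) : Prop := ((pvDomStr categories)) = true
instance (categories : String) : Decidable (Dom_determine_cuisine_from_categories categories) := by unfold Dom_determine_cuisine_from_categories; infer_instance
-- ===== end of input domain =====

-- B replaces A's 15-branch if/elif chain (which scans every keyword group against the category
-- list) by an inverted keyword -> priority index built once with dict.setdefault, plus one pass
-- over the input lines keeping the minimum matched priority (objective: alternative decomposition).

-- ===== PORT A =====
def determine_cuisine_from_categories (categories : String) : String :=
  if categories = "" then "International"
  else
    let category_list : List String := (((PySem.Str.split? categories "\n").getD []).filter
        (fun cat => PySem.Str.strip cat != "")).map (fun cat => PySem.Str.lower (PySem.Str.strip cat))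
    if ["italian", "pasta", "pizza", "risotto", "bruschetta", "carbonara", "lasagna", "gnocchi", "fettuccine", "parmesan", "mozzarella", "bon appétit"].any (fun cat => List.contains category_list cat) then "Italian"
    else if ["mexican", "taco", "burrito", "enchilada", "quesadilla", "jalapeño", "salsa", "guacamole", "chile", "tortilla"].any (fun cat => List.contains category_list cat) then "Mexican"
    else if ["chinese", "kung pao", "lo mein", "stir-fry", "wok", "soy sauce", "ginger", "sesame", "bok choy"].any (fun cat => List.contains category_list cat) then "Chinese"
    else if ["thai", "pad thai", "curry", "tom yum", "coconut", "lemongrass", "basil"].any (fun cat => List.contains category_list cat) then "Thai"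
    else if ["japanese", "sushi", "ramen", "tempura", "miso", "teriyaki", "wasabi", "nori"].any (fun cat => List.contains category_list cat) then "Japanese"
    else if ["korean", "kimchi", "bulgogi", "bibimbap", "gochujang"].any (fun cat => List.contains category_list cat) then "Korean"
    else if ["indian", "curry", "tikka", "biryani", "naan", "masala", "dal", "chutney"].any (fun cat => List.contains category_list cat) then "Indian"
    else if ["french", "coq au vin", "ratatouille", "crêpe", "bourguignon", "confit", "terrine"].any (fun cat => List.contains category_list cat) then "French"
    else if ["german", "schnitzel", "bratwurst", "sauerkraut", "spätzle"].any (fun cat => List.contains category_list cat) then "German"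
    else if ["spanish", "paella", "tapas", "gazpacho", "chorizo", "sherry"].any (fun cat => List.contains category_list cat) then "Spanish"
    else if ["greek", "moussaka", "souvlaki", "tzatziki", "feta", "olive"].any (fun cat => List.contains category_list cat) then "Greek"
    else if ["middle eastern", "hummus", "falafel", "kebab", "pita", "tahini"].any (fun cat => List.contains category_list cat) then "Middle Eastern"
    else if ["american", "burger", "bbq", "mac and cheese", "bacon", "cheesecake", "fourth of july", "picnic"].any (fun cat => List.contains category_list cat) then "American"
    else if ["mediterranean", "olive", "feta", "tomato", "basil"].any (fun cat => List.contains category_list cat) then "Mediterranean"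
    else if ["asian", "stir", "noodle", "soy", "ginger"].any (fun cat => List.contains category_list cat) then "Asian"
    else "International"

-- ===== PORT B =====
def pvCuisines : List (String × List String) := [
  ("Italian", ["italian", "pasta", "pizza", "risotto", "bruschetta", "carbonara", "lasagna", "gnocchi", "fettuccine", "parmesan", "mozzarella", "bon appétit"]),
  ("Mexican", ["mexican", "taco", "burrito", "enchilada", "quesadilla", "jalapeño", "salsa", "guacamole", "chile", "tortilla"]),
  ("Chinese", ["chinese", "kung pao", "lo mein", "stir-fry", "wok", "soy sauce", "ginger", "sesame", "bok choy"]),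
  ("Thai", ["thai", "pad thai", "curry", "tom yum", "coconut", "lemongrass", "basil"]),
  ("Japanese", ["japanese", "sushi", "ramen", "tempura", "miso", "teriyaki", "wasabi", "nori"]),
  ("Korean", ["korean", "kimchi", "bulgogi", "bibimbap", "gochujang"]),
  ("Indian", ["indian", "curry", "tikka", "biryani", "naan", "masala", "dal", "chutney"]),
  ("French", ["french", "coq au vin", "ratatouille", "crêpe", "bourguignon", "confit", "terrine"]),
  ("German", ["german", "schnitzel", "bratwurst", "sauerkraut", "spätzle"]),
  ("Spanish", ["spanish", "paella", "tapas", "gazpacho", "chorizo", "sherry"]),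
  ("Greek", ["greek", "moussaka", "souvlaki", "tzatziki", "feta", "olive"]),
  ("Middle Eastern", ["middle eastern", "hummus", "falafel", "kebab", "pita", "tahini"]),
  ("American", ["american", "burger", "bbq", "mac and cheese", "bacon", "cheesecake", "fourth of july", "picnic"]),
  ("Mediterranean", ["mediterranean", "olive", "feta", "tomato", "basil"]),
  ("Asian", ["asian", "stir", "noodle", "soy", "ginger"])]

-- module-level loop: PRIORITY.setdefault(kw, i) over enumerate(CUISINES)
def pvPriority : PySem.Dict String Int :=
  (List.zipIdx pvCuisines).foldl
    (fun d p => p.1.2.foldl (fun d kw => d.setdefault kw (p.2 : Int)) d)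
    PySem.Dict.empty

def pvNames : List String := pvCuisines.map (fun p => p.1)

-- the loop body's update: 'if i is not None and (best is None or i < best): best = i'
def pvComb (b : Option Int) (h : Option Int) : Option Int :=
  match h with
  | none => b
  | some i => match b with
    | none => some i
    | some bv => if i < bv then some i else some bv

def determine_cuisine_from_categories_alt (categories : String) : String :=
  if categories = "" then "International"
  else
    let best := ((PySem.Str.split? categories "\n").getD []).foldl
      (fun b raw => pvComb b (pvPriority.get? (PySem.Str.lower (PySem.Str.strip raw)))) none
    -- 'NAMES[best] if best is not None else "International"'; the index is always in range
    match best with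
    | none => "International"
    | some i => (PySem.List.pyGet? pvNames i).getD "International"

-- ===== PRECONDITION & SPEC =====
def Spec_determine_cuisine_from_categories (categories : String) (out : String) : Prop := out = determine_cuisine_from_categories_alt categories
instance (categories : String) (out : String) : Decidable (Spec_determine_cuisine_from_categories categories out) := by unfold Spec_determine_cuisine_from_categories; infer_instance

-- ===== CLAIM (what is proved, stated in full; the proofs are below) =====
def Claim_equal_determine_cuisine_from_categories : Prop := ∀ (categories : String), Dom_determine_cuisine_from_categories categories → Spec_determine_cuisine_from_categories categories (determine_cuisine_from_categories categories)

-- ===== LEMMAS AND PROOFS =====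

-- first index (from i) whose keyword group contains c
def pvGidx : List (String × List String) → Int → String → Option Int
  | [], _, _ => none
  | (_, ks) :: rest, i, c => if ks.contains c then some i else pvGidx rest (i + 1) c

-- A's if/elif chain as a recursion over the group table
def pvGchain : List (String × List String) → List String → String
  | [], _ => "International"
  | (name, ks) :: rest, cats => if ks.any (fun k => cats.contains k) then name else pvGchain rest cats

theorem pvGet?_setdefault {ν : Type} (d : PySem.Dict String ν) (k : String) (v : ν) (k' : String) :
    (d.setdefault k v).get? k' = (d.get? k').or (if k' = k then some v else none) := by
  unfold PySem.Dict.setdefault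
  by_cases hc : d.contains k = true
  · simp only [hc, if_true]
    cases hg : d.get? k' with
    | some w => simp [Option.or, hg]
    | none =>
      by_cases he : k' = k
      · subst he
        rw [PySem.Dict.contains_eq_isSome_get?] at hc
        simp [hg] at hc
      · simp [Option.or, hg, he]
  · simp only [hc, if_false]
    show Option.map _ (List.find? _ (d.items ++ [(k, v)])) = _
    rw [List.find?_append]
    cases hg : List.find? (fun p => p.1 == k') d.items with
    | some w => simp [PySem.Dict.get?, hg, Option.or]
    | none =>
      by_cases he : k' = k
      · subst he; simp [PySem.Dict.get?, hg, Option.or, List.find?]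
      · have hb : (k == k') = false := beq_false_of_ne (Ne.symm he)
        simp [PySem.Dict.get?, hg, Option.or, List.find?, hb, he]

theorem pvInnerFold {ks : List String} : ∀ (d : PySem.Dict String Int) (v : Int) (k : String),
    ((ks.foldl (fun d kw => d.setdefault kw v) d).get? k)
      = (d.get? k).or (if ks.contains k then some v else none) := by
  induction ks with
  | nil => intro d v k; cases hg : d.get? k <;> simp [Option.or, hg]
  | cons kw rest ih =>
    intro d v k
    simp only [List.foldl_cons]
    rw [ih, pvGet?_setdefault]
    cases hg : d.get? k with
    | some w => simp [Option.or, hg]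
    | none =>
      by_cases he : k = kw
      · subst he; simp [Option.or, hg, List.contains_cons]
      · simp [Option.or, hg, List.contains_cons, he, Ne.symm he]

theorem pvBuildFold : ∀ (gs : List (String × List String)) (i0 : Nat) (d : PySem.Dict String Int) (k : String),
    (((List.zipIdx gs i0).foldl (fun d p => p.1.2.foldl (fun d kw => d.setdefault kw (p.2 : Int)) d) d).get? k)
      = (d.get? k).or (pvGidx gs (i0 : Int) k) := by
  intro gs
  induction gs with
  | nil => intro i0 d k; cases hg : d.get? k <;> simp [pvGidx, Option.or, hg]
  | cons g rest ih =>
    intro i0 d k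
    obtain ⟨name, ks⟩ := g
    simp only [List.zipIdx_cons, List.foldl_cons]
    rw [ih, pvInnerFold]
    have hcast : ((i0 + 1 : Nat) : Int) = (i0 : Int) + 1 := by push_cast; ring
    rw [hcast]
    cases hg : d.get? k with
    | some w => simp [Option.or, hg]
    | none =>
      simp only [hg, Option.none_or]
      simp only [pvGidx]
      split_ifs <;> simp

theorem pvPriority_get? (k : String) : pvPriority.get? k = pvGidx pvCuisines 0 k := by
  show ((List.zipIdx pvCuisines 0).foldl _ PySem.Dict.empty).get? k = _
  rw [pvBuildFold pvCuisines 0 PySem.Dict.empty k]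
  simp [Option.or, PySem.Dict.get?_empty]

theorem pvComb_none_left (h : Option Int) : pvComb none h = h := by cases h <;> rfl

theorem pvComb_some (x y : Int) : pvComb (some x) (some y) = some (min x y) := by
  simp only [pvComb]
  split_ifs <;> congr 1 <;> omega

theorem pvComb_none_right (b : Option Int) : pvComb b none = b := rfl

theorem pvComb_assoc (a b c : Option Int) : pvComb (pvComb a b) c = pvComb a (pvComb b c) := by
  cases a with
  | none => rw [pvComb_none_left, pvComb_none_left]
  | some x =>
    cases b with
    | none => rw [pvComb_none_right, pvComb_none_left]
    | some y =>
      cases c with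
      | none => rw [pvComb_none_right, pvComb_none_right]
      | some z => rw [pvComb_some, pvComb_some, pvComb_some, pvComb_some, min_assoc]

-- F h cats = the fold of pvComb over (h applied to) cats from none
theorem pvFoldFrom (h : String → Option Int) : ∀ (cats : List String) (b : Option Int),
    cats.foldl (fun b c => pvComb b (h c)) b
      = pvComb b (cats.foldl (fun b c => pvComb b (h c)) none) := by
  intro cats
  induction cats with
  | nil => intro b; cases b <;> rfl
  | cons c cats ih =>
    intro b
    simp only [List.foldl_cons]
    rw [ih (pvComb b (h c)), pvComb_assoc, pvComb_none_left, ih (h c)]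

theorem pvFm_cons (h : String → Option Int) (c : String) (cats : List String) :
    (c :: cats).foldl (fun b x => pvComb b (h x)) none
      = pvComb (h c) (cats.foldl (fun b x => pvComb b (h x)) none) := by
  simp only [List.foldl_cons, pvComb_none_left]
  exact pvFoldFrom h cats (h c)

theorem pvFm_none (h : String → Option Int) (hh : ∀ c, h c = none) (cats : List String) :
    cats.foldl (fun b c => pvComb b (h c)) none = none := by
  induction cats with
  | nil => rfl
  | cons c cats ih => rw [pvFm_cons, hh, ih]; rfl

theorem pvFm_bound (h : String → Option Int) (i0 : Int) (hh : ∀ c j, h c = some j → i0 < j) :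
    ∀ (cats : List String) (j : Int),
    cats.foldl (fun b c => pvComb b (h c)) none = some j → i0 < j := by
  intro cats
  induction cats with
  | nil => intro j hj; simp at hj
  | cons c cats ih =>
    intro j hj
    rw [pvFm_cons] at hj
    cases hhc : h c with
    | none => rw [hhc, pvComb_none_left] at hj; exact ih j hj
    | some v =>
      rw [hhc] at hj
      cases hr : cats.foldl (fun b x => pvComb b (h x)) none with
      | none =>
        rw [hr] at hj
        have hv := hh c v hhc
        simp only [pvComb] at hj
        injection hj with hj
        omega
      | some w =>
        rw [hr] at hj
        have hv := hh c v hhc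
        have hw := ih w hr
        simp only [pvComb] at hj
        split_ifs at hj <;> injection hj with hj <;> omega

theorem pvGidx_bound : ∀ (gs : List (String × List String)) (i : Int) (c : String) (j : Int),
    pvGidx gs i c = some j → i ≤ j := by
  intro gs
  induction gs with
  | nil => intro i c j h; simp [pvGidx] at h
  | cons g rest ih =>
    intro i c j h
    obtain ⟨n, ks⟩ := g
    simp only [pvGidx] at h
    split_ifs at h
    · injection h with h; omega
    · have := ih (i + 1) c j h; omega

theorem pvFm_group (n : String) (ks : List String) (rest : List (String × List String)) (i0 : Int) :
    ∀ (cats : List String),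
    cats.foldl (fun b c => pvComb b (pvGidx ((n, ks) :: rest) i0 c)) none
      = if cats.any (fun c => ks.contains c)
        then some i0
        else cats.foldl (fun b c => pvComb b (pvGidx rest (i0 + 1) c)) none := by
  have hbnd : ∀ c j, pvGidx rest (i0 + 1) c = some j → i0 < j := by
    intro c j h; have := pvGidx_bound rest (i0 + 1) c j h; omega
  intro cats
  induction cats with
  | nil => simp
  | cons c cats ih =>
    rw [pvFm_cons, ih]
    by_cases hc : ks.contains c = true
    · have hg1 : pvGidx ((n, ks) :: rest) i0 c = some i0 := by
        show (if ks.contains c = true then some i0 else pvGidx rest (i0 + 1) c) = some i0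
        rw [if_pos hc]
      rw [hg1]
      have hany : (c :: cats).any (fun x => ks.contains x) = true := by
        simp only [List.any_cons, hc, Bool.true_or]
      rw [if_pos hany]
      by_cases ha : cats.any (fun x => ks.contains x) = true
      · rw [if_pos ha]
        show (if i0 < i0 then some i0 else some i0) = some i0
        rw [if_neg (by omega)]
      · rw [if_neg ha]
        cases hr : cats.foldl (fun b x => pvComb b (pvGidx rest (i0 + 1) x)) none with
        | none => rfl
        | some j =>
          have hij : i0 < j := pvFm_bound _ i0 hbnd cats j hr
          show (if j < i0 then some j else some i0) = some i0
          rw [if_neg (by omega)]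
    · have hg1 : pvGidx ((n, ks) :: rest) i0 c = pvGidx rest (i0 + 1) c := by
        show (if ks.contains c = true then some i0 else pvGidx rest (i0 + 1) c) = _
        rw [if_neg hc]
      rw [hg1]
      have hc' : ks.contains c = false := by simpa using hc
      have hany : (c :: cats).any (fun x => ks.contains x)
          = cats.any (fun x => ks.contains x) := by
        simp only [List.any_cons, hc', Bool.false_or]
      rw [hany]
      by_cases ha : cats.any (fun x => ks.contains x) = true
      · rw [if_pos ha, if_pos ha]
        cases hgc : pvGidx rest (i0 + 1) c with
        | none => rw [pvComb_none_left]
        | some j =>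
          have hij : i0 < j := hbnd c j hgc
          show (if i0 < j then some i0 else some j) = some i0
          rw [if_pos hij]
      · rw [if_neg ha, if_neg ha, pvFm_cons]

theorem pvChain_eq : ∀ (gs : List (String × List String)) (i0 : Nat) (names : List String)
    (cats : List String), names.drop i0 = gs.map (fun p => p.1) →
    (match cats.foldl (fun b c => pvComb b (pvGidx gs (i0 : Int) c)) none with
      | none => "International"
      | some i => (PySem.List.pyGet? names i).getD "International")
      = pvGchain gs cats := by
  intro gs
  induction gs with
  | nil =>
    intro i0 names cats _
    rw [pvFm_none (fun c => pvGidx [] (i0 : Int) c) (fun c => rfl) cats]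
    rfl
  | cons g rest ih =>
    intro i0 names cats hnm
    obtain ⟨name, ks⟩ := g
    rw [pvFm_group]
    have hswap : (ks.any (fun k => cats.contains k)) = (cats.any (fun c => ks.contains c)) := by
      rw [Bool.eq_iff_iff]
      simp only [List.any_eq_true, List.contains_iff_mem]
      exact ⟨fun ⟨a, h1, h2⟩ => ⟨a, h2, h1⟩, fun ⟨a, h1, h2⟩ => ⟨a, h2, h1⟩⟩
    show _ = (if ks.any (fun k => cats.contains k) = true then name else pvGchain rest cats)
    rw [hswap]
    by_cases ha : cats.any (fun c => ks.contains c) = true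
    · rw [if_pos ha, if_pos ha]
      show (PySem.List.pyGet? names (i0 : Int)).getD "International" = name
      have hidx : names[i0]? = some name := by
        have h0 : (List.drop i0 names)[0]? = names[i0 + 0]? := List.getElem?_drop
        rw [hnm] at h0
        simpa using h0.symm
      rw [PySem.List.pyGet?_natCast, hidx]
      rfl
    · rw [if_neg ha, if_neg ha]
      have hcast : ((i0 : Int) + 1) = ((i0 + 1 : Nat) : Int) := by push_cast; ring
      rw [hcast]
      apply ih (i0 + 1) names cats
      rw [← List.drop_drop, hnm]
      rfl

theorem pvGidx_empty_str : pvGidx pvCuisines 0 (PySem.Str.lower "") = none := by decide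

theorem pvNormFold : ∀ (lines : List String) (b : Option Int),
    lines.foldl (fun b raw => pvComb b (pvGidx pvCuisines 0 (PySem.Str.lower (PySem.Str.strip raw)))) b
      = ((lines.filter (fun c => PySem.Str.strip c != "")).map
          (fun c => PySem.Str.lower (PySem.Str.strip c))).foldl
          (fun b c => pvComb b (pvGidx pvCuisines 0 c)) b := by
  intro lines
  induction lines with
  | nil => intro b; simp
  | cons raw rest ih =>
    intro b
    by_cases hs : PySem.Str.strip raw = ""
    · simp only [List.foldl_cons, List.filter_cons, hs, bne_self_eq_false,
        Bool.false_eq_true, if_false]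
      rw [pvGidx_empty_str, pvComb_none_right]
      exact ih b
    · simp only [List.foldl_cons, List.filter_cons, hs, bne_iff_ne, ne_eq,
        not_false_eq_true, if_pos, List.map_cons]
      exact ih _

theorem pvChain_zero (cats : List String) :
    (match cats.foldl (fun b c => pvComb b (pvGidx pvCuisines 0 c)) none with
      | none => "International"
      | some i => (PySem.List.pyGet? pvNames i).getD "International")
      = pvGchain pvCuisines cats := by
  have h := pvChain_eq pvCuisines 0 pvNames cats rfl
  simpa using h

-- ===== VERDICT (by name: the statement is the Claim_ definition above) =====
theorem determine_cuisine_from_categories_spec : Claim_equal_determine_cuisine_from_categories := by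
  intro categories _
  unfold Spec_determine_cuisine_from_categories
  by_cases h : categories = ""
  · simp [determine_cuisine_from_categories, determine_cuisine_from_categories_alt, h]
  · have hAlt : determine_cuisine_from_categories_alt categories
        = pvGchain pvCuisines ((((PySem.Str.split? categories "\n").getD []).filter
            (fun c => PySem.Str.strip c != "")).map
            (fun c => PySem.Str.lower (PySem.Str.strip c))) := by
      unfold determine_cuisine_from_categories_alt
      rw [if_neg h]
      show (match ((PySem.Str.split? categories "\n").getD []).foldl
            (fun b raw => pvComb b (pvPriority.get? (PySem.Str.lower (PySem.Str.strip raw)))) none with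
          | none => "International"
          | some i => (PySem.List.pyGet? pvNames i).getD "International") = _
      simp only [pvPriority_get?]
      rw [pvNormFold _ none]
      exact pvChain_zero _
    rw [hAlt]
    unfold determine_cuisine_from_categories
    rw [if_neg h]
    simp only [pvGchain, pvCuisines]
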